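-- pv_equiv track=rewrite | github.com/locdo7039-lgtm/DoThanhLoc | main.py | tron_mang_min
-- ===== SOURCE A (Python) =====
-- def tron_mang_min(a, b):
--     ket_qua = []
--     min_len = min(len(a), len(b))
--     for i in range(min_len):
--         ket_qua.append(min(a[i], b[i]))
--     if len(a) > len(b):
--         ket_qua.extend(a[min_len:])
--     else:
--         ket_qua.extend(b[min_len:])
--     return ket_qua
-- ===== SOURCE B (Python) =====
-- def tron_mang_min(a, b):
--     _END = object()
--     it_a, it_b = iter(a), iter(b)
--     out = []
--     while True:
--         x = next(it_a, _END)
--         y = next(it_b, _END)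
--         if x is _END:
--             if y is not _END:
--                 out.append(y)
--                 out.extend(it_b)
--             return out
--         if y is _END:
--             out.append(x)
--             out.extend(it_a)
--             return out
--         out.append(min(x, y))
-- ===== Notes on version B (the rewrite author's own statement) =====
-- stated objective: alternative
-- what changed: B never computes lengths or indices: it co-consumes both inputs through iterators with a sentinel, emitting min(x,y) per step, and when one stream ends it drains the other iterator as the tail, replacing A's range(min_len) index loop plus length-comparison extend branch.
import Mathlib
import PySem

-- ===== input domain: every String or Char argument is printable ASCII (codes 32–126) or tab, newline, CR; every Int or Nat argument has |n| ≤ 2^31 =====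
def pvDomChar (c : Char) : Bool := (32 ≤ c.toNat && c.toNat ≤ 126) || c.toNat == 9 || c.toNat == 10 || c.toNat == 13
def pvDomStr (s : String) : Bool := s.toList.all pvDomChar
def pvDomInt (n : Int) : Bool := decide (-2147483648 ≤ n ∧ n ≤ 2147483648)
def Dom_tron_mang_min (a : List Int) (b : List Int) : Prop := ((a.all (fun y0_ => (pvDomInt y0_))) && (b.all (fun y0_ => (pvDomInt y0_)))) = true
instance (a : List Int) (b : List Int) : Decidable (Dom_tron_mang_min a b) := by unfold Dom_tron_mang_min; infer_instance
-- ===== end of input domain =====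

-- B is length- and index-free: it co-consumes both inputs (iterators in Python, list recursion here),
-- emitting min per step and draining the surviving stream as tail (objective: alternative decomposition).

-- ===== PORT A =====
def tron_mang_min (a : List Int) (b : List Int) : List Int :=
  let min_len : Int := min (a.length : Int) (b.length : Int)
  let ket_qua := (PySem.List.pyRange 0 min_len 1).foldl
    (fun acc i => acc ++ [min (PySem.List.pyGetD a i 0) (PySem.List.pyGetD b i 0)]) []
  if (a.length : Int) > (b.length : Int) then
    ket_qua ++ PySem.List.slice a (some min_len) none
  else
    ket_qua ++ PySem.List.slice b (some min_len) none

-- ===== PORT B =====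
-- the while loop of Source B: each turn pulls one element from each stream; when a stream is
-- exhausted (sentinel) the rest of the other stream is drained into out and returned
def tronAltLoop (out : List Int) : List Int → List Int → List Int
  | [], b => out ++ b
  | a, [] => out ++ a
  | x :: a, y :: b => tronAltLoop (out ++ [min x y]) a b

def tron_mang_min_alt (a : List Int) (b : List Int) : List Int :=
  tronAltLoop [] a b

-- ===== PRECONDITION & SPEC =====
def Spec_tron_mang_min (a : List Int) (b : List Int) (out : List Int) : Prop := out = tron_mang_min_alt a b
instance (a : List Int) (b : List Int) (out : List Int) : Decidable (Spec_tron_mang_min a b out) := by unfold Spec_tron_mang_min; infer_instance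

-- ===== CLAIM (what is proved, stated in full; the proofs are below) =====
def Claim_equal_tron_mang_min : Prop := ∀ (a : List Int) (b : List Int), Dom_tron_mang_min a b → Spec_tron_mang_min a b (tron_mang_min a b)

-- ===== LEMMAS AND PROOFS =====

-- a foldl over range(m) that transliterates a Python indexed loop becomes a foldl over List.range
theorem pyRange_foldl_range {α : Type} (m : Nat) (f : α → Int → α) (init : α) :
    (PySem.List.pyRange 0 (m : Int) 1).foldl f init
      = (List.range m).foldl (fun s (k : Nat) => f s (k : Int)) init := by
  rw [PySem.List.pyRange_one, List.foldl_map]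
  simp only [Int.sub_zero, Int.toNat_natCast, zero_add]

-- A's prefix loop computes exactly zipWith min
theorem map_range_zipWith (a b : List Int) :
    (List.range (min a.length b.length)).map (fun k => min (a.getD k 0) (b.getD k 0))
      = List.zipWith min a b := by
  apply List.ext_getElem
  · simp
  · intro k h1 h2
    have hk : k < min a.length b.length := by simpa using h1
    simp [List.getD_eq_getElem?_getD, List.getElem?_eq_getElem (by omega : k < a.length),
      List.getElem?_eq_getElem (by omega : k < b.length)]

-- B's loop: out accumulates zipWith min, then the surviving list's tail
theorem tronAltLoop_eq (a : List Int) : ∀ (b out : List Int),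
    tronAltLoop out a b
      = out ++ List.zipWith min a b
          ++ (if a.length > b.length then a.drop b.length else b.drop a.length) := by
  induction a with
  | nil => intro b out; simp [tronAltLoop]
  | cons x a ih =>
    intro b out
    cases b with
    | nil => simp [tronAltLoop]
    | cons y b =>
      simp only [tronAltLoop, ih, List.zipWith_cons_cons, List.length_cons, List.drop_succ_cons]
      have : (a.length + 1 > b.length + 1) = (a.length > b.length) := by
        simp
      simp [this]

theorem tron_mang_min_spec : Claim_equal_tron_mang_min := by
  unfold Claim_equal_tron_mang_min
  intro a b _
  unfold Spec_tron_mang_min tron_mang_min tron_mang_min_alt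
  set m : Nat := min a.length b.length with hm
  have hmle : (min (a.length : Int) (b.length : Int)) = (m : Int) := by
    simp [hm, Nat.cast_min]
  simp only [hmle]
  rw [pyRange_foldl_range, PySem.List.foldl_append_singleton_eq_map]
  simp only [PySem.List.pyGetD_natCast]
  rw [map_range_zipWith, tronAltLoop_eq, PySem.List.slice_from_natCast, PySem.List.slice_from_natCast]
  by_cases hab : (a.length : Int) > (b.length : Int)
  · have : a.length > b.length := by exact_mod_cast hab
    rw [if_pos hab, if_pos this]
    have hmb : m = b.length := by omega
    simp [hmb]
  · have : ¬ a.length > b.length := by omega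
    rw [if_neg hab, if_neg this]
    have hma : m = a.length := by omega
    simp [hma]
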